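-- pv_equiv track=rewrite | github.com/yustero/csb | programs/three_state_formalism_and_hybridness/three_states_sim.py | steady_check
-- ===== SOURCE A (Python) =====
-- def evolve(nodes_state,adj,pos):
--
--     n=len(adj)
--     adj_sum=0
--     buffer=nodes_state.copy()
--     for i in range(0,n):
--         adj_sum+= (nodes_state[i]*adj[i][pos])
--     if adj_sum>0:
--         buffer[pos]=1
--
--
--     elif adj_sum<0:
--         buffer[pos]=-1
--
--     elif adj_sum==0:
--         buffer[pos]=0
--     return(buffer)
--
-- def steady_check(nodes,adj):
--     n=len(adj)
--     count=0
--     for i in range(0,n):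
--         if evolve(nodes,adj,i)[i]!= nodes[i]:
--
--            count+=1
--
--     if count==0:
--         return(True)
--     else:
--         return(False)
-- ===== SOURCE B (Python) =====
-- def steady_check(nodes, adj):
--     # A steady state needs nodes[i] == sign(column sum), and a sign is always in
--     # {-1, 0, 1}: so first reject outright if any node is out of the three-state
--     # alphabet, then aggregate whole rows additively bucketed by the node's state
--     # (+row for state 1, -row for state -1, state-0 rows skipped; no multiplications),
--     # and finally verify each node's state against the matching sign condition.
--     n = len(adj)
--     if any(nodes[i] not in (-1, 0, 1) for i in range(n)):
--         return False
--     sums = [0] * n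
--     for j in range(n):
--         x = nodes[j]
--         if x == 1:
--             sums = [s + r for s, r in zip(sums, adj[j])]
--         elif x == -1:
--             sums = [s - r for s, r in zip(sums, adj[j])]
--     return all((x == 1 and s > 0) or (x == -1 and s < 0) or (x == 0 and s == 0)
--                for x, s in zip(nodes, sums))
-- ===== Notes on version B (the rewrite author's own statement) =====
-- stated objective: faster
-- what changed: B drops the evolve()/multiply machinery entirely: it rejects immediately if any node state is outside the three-state alphabet {-1,0,1} (a sign can never equal such a value), then aggregates whole rows additively bucketed by the node's state (+row for 1, -row for -1, state-0 rows skipped, no multiplications and no per-node buffer copies), and finally checks each state against its sign condition.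
import Mathlib
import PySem

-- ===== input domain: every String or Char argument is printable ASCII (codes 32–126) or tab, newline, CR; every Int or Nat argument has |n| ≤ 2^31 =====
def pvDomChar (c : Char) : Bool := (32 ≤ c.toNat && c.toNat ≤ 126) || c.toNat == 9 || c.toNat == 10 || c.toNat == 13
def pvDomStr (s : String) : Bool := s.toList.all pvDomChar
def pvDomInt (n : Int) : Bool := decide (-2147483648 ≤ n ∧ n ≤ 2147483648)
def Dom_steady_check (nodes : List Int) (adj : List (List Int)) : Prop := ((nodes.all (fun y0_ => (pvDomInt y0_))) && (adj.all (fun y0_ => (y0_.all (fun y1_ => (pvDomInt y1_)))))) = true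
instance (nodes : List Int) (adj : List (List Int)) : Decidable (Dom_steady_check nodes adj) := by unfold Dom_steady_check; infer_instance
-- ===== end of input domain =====

-- B drops the per-node evolve()/multiply machinery: it rejects immediately when a node is
-- outside the three-state alphabet {-1,0,1}, aggregates whole rows additively bucketed by
-- the node's state (+row / -row / skip, no multiplications), and checks each state
-- against its sign condition (objective: alternative decomposition, faster in practice).

-- ===== PORT A =====
-- 'buffer[pos] = v' is ported as List.set pos.toNat v: exact for 0 ≤ pos < len(buffer),
-- which Pre_steady_check guarantees for every pos the loop passes in.
def evolve (nodes_state : List Int) (adj : List (List Int)) (pos : Int) : List Int :=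
  let n : Int := adj.length
  let adj_sum : Int := (PySem.List.pyRange 0 n 1).foldl
    (fun s i => s + (PySem.List.pyGetD nodes_state i 0) *
                    (PySem.List.pyGetD (PySem.List.pyGetD adj i []) pos 0)) 0
  let buffer := nodes_state
  if adj_sum > 0 then buffer.set pos.toNat 1
  else if adj_sum < 0 then buffer.set pos.toNat (-1)
  else if adj_sum = 0 then buffer.set pos.toNat 0
  else buffer

def steady_check (nodes : List Int) (adj : List (List Int)) : Bool :=
  let n : Int := adj.length
  let count : Int := (PySem.List.pyRange 0 n 1).foldl
    (fun count i =>
      if PySem.List.pyGetD (evolve nodes adj i) i 0 ≠ PySem.List.pyGetD nodes i 0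
      then count + 1 else count) 0
  if count = 0 then true else false

-- ===== PORT B =====
def steady_check_alt (nodes : List Int) (adj : List (List Int)) : Bool :=
  let n : Int := adj.length
  if (PySem.List.pyRange 0 n 1).any (fun i =>
      let x := PySem.List.pyGetD nodes i 0
      !(x == -1 || x == 0 || x == 1)) then false
  else
    let sums0 : List Int := List.replicate n.toNat 0
    let sums := (PySem.List.pyRange 0 n 1).foldl
      (fun sums j =>
        let x := PySem.List.pyGetD nodes j 0
        if x = 1 then List.zipWith (· + ·) sums (PySem.List.pyGetD adj j [])
        else if x = -1 then List.zipWith (· - ·) sums (PySem.List.pyGetD adj j [])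
        else sums)
      sums0
    (nodes.zip sums).all (fun p =>
      (p.1 == 1 && p.2 > 0) || (p.1 == -1 && p.2 < 0) || (p.1 == 0 && p.2 == 0))

-- ===== PRECONDITION & SPEC =====
-- Pre_ is exactly A's return domain: A raises IndexError iff nodes is shorter than
-- len(adj) or some row of adj is shorter than len(adj).
def Pre_steady_check (nodes : List Int) (adj : List (List Int)) : Prop :=
  adj.length ≤ nodes.length ∧ ∀ row ∈ adj, adj.length ≤ row.length
instance (nodes : List Int) (adj : List (List Int)) : Decidable (Pre_steady_check nodes adj) := by
  unfold Pre_steady_check; infer_instance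

def pvWitness_steady_check : List Int × List (List Int) :=
  ([1, -1, 0], [[1, 0, 0], [0, 1, 0], [0, 0, 0]])

def Spec_steady_check (nodes : List Int) (adj : List (List Int)) (out : Bool) : Prop := out = steady_check_alt nodes adj
instance (nodes : List Int) (adj : List (List Int)) (out : Bool) : Decidable (Spec_steady_check nodes adj out) := by unfold Spec_steady_check; infer_instance

-- ===== CLAIM (what is proved, stated in full; the proofs are below) =====
def Claim_equal_steady_check : Prop := ∀ (nodes : List Int) (adj : List (List Int)), Dom_steady_check nodes adj → Pre_steady_check nodes adj → Spec_steady_check nodes adj (steady_check nodes adj)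

-- ===== LEMMAS AND PROOFS =====

-- the sign rule A applies to a column sum
def pvSgn (s : Int) : Int := if s > 0 then 1 else if s < 0 then -1 else 0

-- the column sum for column i
def pvCol (nodes : List Int) (adj : List (List Int)) (i : Int) : Int :=
  ((PySem.List.pyRange 0 adj.length 1).map
    (fun j => (PySem.List.pyGetD nodes j 0) *
              (PySem.List.pyGetD (PySem.List.pyGetD adj j []) i 0))).sum

-- A's evolve[i] is the sign of the column sum (pos in range, nodes long enough)
theorem evolve_get (nodes : List Int) (adj : List (List Int)) (pos : Int)
    (h0 : 0 ≤ pos) (h1 : pos.toNat < nodes.length) :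
    PySem.List.pyGetD (evolve nodes adj pos) pos 0 = pvSgn (pvCol nodes adj pos) := by
  have hset : ∀ (k : Nat) (v : Int), k < nodes.length →
      PySem.List.pyGetD (nodes.set k v) (↑k) 0 = v := by
    intro k v hk
    rw [PySem.List.pyGetD_natCast]
    simp [List.getD, hk]
  have hpos : ((pos.toNat : Nat) : Int) = pos := by omega
  unfold evolve pvSgn pvCol
  dsimp only
  rw [PySem.List.foldl_add]
  simp only [zero_add]
  split_ifs with hA hB hC
  · rw [← hpos]; exact hset _ _ h1
  · rw [← hpos]; exact hset _ _ h1
  · rw [← hpos]; exact hset _ _ h1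
  · omega

-- characterisation of A
theorem steady_check_iff (nodes : List Int) (adj : List (List Int))
    (hpre : Pre_steady_check nodes adj) :
    steady_check nodes adj = true ↔
      ∀ i ∈ PySem.List.pyRange 0 (adj.length : Int) 1,
        pvSgn (pvCol nodes adj i) = PySem.List.pyGetD nodes i 0 := by
  obtain ⟨hn, _⟩ := hpre
  unfold steady_check
  dsimp only
  rw [PySem.List.foldl_ite_add_one
      (p := fun i => PySem.List.pyGetD (evolve nodes adj i) i 0 ≠ PySem.List.pyGetD nodes i 0)]
  simp only [zero_add]
  constructor
  · intro h i hi
    split_ifs at h with hc0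
    · have hc : ((PySem.List.pyRange 0 (adj.length : Int) 1).countP
          (fun i => decide (PySem.List.pyGetD (evolve nodes adj i) i 0 ≠ PySem.List.pyGetD nodes i 0))) = 0 := by
        exact_mod_cast hc0
      rw [List.countP_eq_zero] at hc
      have hthis := hc i hi
      have hi' := PySem.List.mem_pyRange_one.mp hi
      rw [evolve_get nodes adj i hi'.1 (by omega)] at hthis
      simpa using hthis
  · intro h
    have hc : ((PySem.List.pyRange 0 (adj.length : Int) 1).countP
        (fun i => decide (PySem.List.pyGetD (evolve nodes adj i) i 0 ≠ PySem.List.pyGetD nodes i 0))) = 0 := by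
      rw [List.countP_eq_zero]
      intro i hi
      have hi' := PySem.List.mem_pyRange_one.mp hi
      rw [evolve_get nodes adj i hi'.1 (by omega)]
      simpa using h i hi
    rw [hc]
    norm_num

-- B's bucketed accumulation: length is preserved and each entry is the partial column sum,
-- provided every index of L is in range and every visited node state is three-valued.
theorem sumsB_get (nodes : List Int) (adj : List (List Int))
    (hrow : ∀ row ∈ adj, adj.length ≤ row.length)
    (L : List Int) (hL : ∀ j ∈ L, 0 ≤ j ∧ j.toNat < adj.length)
    (hV : ∀ j ∈ L, PySem.List.pyGetD nodes j 0 = -1 ∨ PySem.List.pyGetD nodes j 0 = 0 ∨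
                   PySem.List.pyGetD nodes j 0 = 1)
    (s : List Int) (hs : s.length = adj.length) :
    (L.foldl (fun sums j =>
        if PySem.List.pyGetD nodes j 0 = 1 then
          List.zipWith (· + ·) sums (PySem.List.pyGetD adj j [])
        else if PySem.List.pyGetD nodes j 0 = -1 then
          List.zipWith (· - ·) sums (PySem.List.pyGetD adj j [])
        else sums) s).length = adj.length ∧
    ∀ k : Nat, k < adj.length →
      (L.foldl (fun sums j =>
        if PySem.List.pyGetD nodes j 0 = 1 then
          List.zipWith (· + ·) sums (PySem.List.pyGetD adj j [])
        else if PySem.List.pyGetD nodes j 0 = -1 then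
          List.zipWith (· - ·) sums (PySem.List.pyGetD adj j [])
        else sums) s).getD k 0
      = s.getD k 0 +
        (L.map (fun j => (PySem.List.pyGetD nodes j 0) *
            PySem.List.pyGetD (PySem.List.pyGetD adj j []) (k : Int) 0)).sum := by
  induction L generalizing s with
  | nil => exact ⟨hs, by simp⟩
  | cons j rest ih =>
    have hj := hL j (List.mem_cons_self ..)
    have hrowj : PySem.List.pyGetD adj j [] = adj.getD j.toNat [] := by
      have : j = ((j.toNat : Nat) : Int) := by omega
      conv_lhs => rw [this]
      rw [PySem.List.pyGetD_natCast]
    have hmem : adj.getD j.toNat [] ∈ adj := by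
      rw [List.getD_eq_getElem _ _ hj.2]; exact List.getElem_mem _
    have hrl : adj.length ≤ (PySem.List.pyGetD adj j []).length := by
      rw [hrowj]; exact hrow _ hmem
    set step := fun (sums : List Int) (j : Int) =>
        if PySem.List.pyGetD nodes j 0 = 1 then
          List.zipWith (· + ·) sums (PySem.List.pyGetD adj j [])
        else if PySem.List.pyGetD nodes j 0 = -1 then
          List.zipWith (· - ·) sums (PySem.List.pyGetD adj j [])
        else sums with hstep
    have hslen : (step s j).length = adj.length := by
      rw [hstep]; dsimp only
      split_ifs <;> simp [List.length_zipWith, hs] <;> omega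
    have hsk : ∀ k : Nat, k < adj.length →
        (step s j).getD k 0 = s.getD k 0 +
          (PySem.List.pyGetD nodes j 0) *
            PySem.List.pyGetD (PySem.List.pyGetD adj j []) (k : Int) 0 := by
      intro k hk
      have hks : k < s.length := by omega
      have hkr : k < (PySem.List.pyGetD adj j []).length := by omega
      have hkz : ∀ f : Int → Int → Int,
          (List.zipWith f s (PySem.List.pyGetD adj j [])).getD k 0
            = f s[k] (PySem.List.pyGetD adj j [])[k] := by
        intro f
        have : k < (List.zipWith f s (PySem.List.pyGetD adj j [])).length := by
          simp [List.length_zipWith]; omega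
        rw [List.getD_eq_getElem _ _ this, List.getElem_zipWith]
      have hrk : PySem.List.pyGetD (PySem.List.pyGetD adj j []) (k : Int) 0
          = (PySem.List.pyGetD adj j [])[k] := by
        rw [PySem.List.pyGetD_natCast, List.getD_eq_getElem _ _ hkr]
      rw [hstep]; dsimp only
      rcases hV j (List.mem_cons_self ..) with hx | hx | hx
      · rw [hx, if_neg (by norm_num), if_pos rfl, hkz, hrk,
            List.getD_eq_getElem _ _ hks]; ring
      · rw [hx, if_neg (by norm_num), if_neg (by norm_num)]; ring
      · rw [hx, if_pos rfl, hkz, hrk, List.getD_eq_getElem _ _ hks]; ring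
    have hrest := ih (fun x hx => hL x (List.mem_cons_of_mem _ hx))
      (fun x hx => hV x (List.mem_cons_of_mem _ hx)) (step s j) hslen
    refine ⟨by simpa using hrest.1, ?_⟩
    intro k hk
    rw [List.foldl_cons]
    rw [hrest.2 k hk, hsk k hk]
    simp [add_assoc]

-- characterisation of B under validity of all visited node states
theorem steady_check_alt_iff (nodes : List Int) (adj : List (List Int))
    (hpre : Pre_steady_check nodes adj) :
    steady_check_alt nodes adj = true ↔
      ∀ i ∈ PySem.List.pyRange 0 (adj.length : Int) 1,
        pvSgn (pvCol nodes adj i) = PySem.List.pyGetD nodes i 0 := by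
  obtain ⟨hn, hrow⟩ := hpre
  unfold steady_check_alt
  dsimp only
  by_cases hinv : ∃ i ∈ PySem.List.pyRange 0 (adj.length : Int) 1,
      PySem.List.pyGetD nodes i 0 ≠ -1 ∧ PySem.List.pyGetD nodes i 0 ≠ 0 ∧
      PySem.List.pyGetD nodes i 0 ≠ 1
  · -- some state outside {-1,0,1}: both sides are false / fail
    obtain ⟨i, hi, hx⟩ := hinv
    have hguard : (PySem.List.pyRange 0 (adj.length : Int) 1).any (fun i =>
        let x := PySem.List.pyGetD nodes i 0
        !(x == -1 || x == 0 || x == 1)) = true := by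
      rw [List.any_eq_true]
      exact ⟨i, hi, by simp [hx.1, hx.2.1, hx.2.2]⟩
    rw [hguard]
    simp only [if_true]
    constructor
    · intro h; exact absurd h (by simp)
    · intro h
      have := h i hi
      unfold pvSgn at this
      split_ifs at this <;> simp [← this] at hx
  · -- every visited state is in {-1,0,1}
    push Not at hinv
    have hV : ∀ j ∈ PySem.List.pyRange 0 (adj.length : Int) 1,
        PySem.List.pyGetD nodes j 0 = -1 ∨ PySem.List.pyGetD nodes j 0 = 0 ∨
        PySem.List.pyGetD nodes j 0 = 1 := by
      intro j hj
      by_cases h1 : PySem.List.pyGetD nodes j 0 = -1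
      · exact Or.inl h1
      by_cases h2 : PySem.List.pyGetD nodes j 0 = 0
      · exact Or.inr (Or.inl h2)
      · exact Or.inr (Or.inr (hinv j hj h1 h2))
    have hguard : (PySem.List.pyRange 0 (adj.length : Int) 1).any (fun i =>
        let x := PySem.List.pyGetD nodes i 0
        !(x == -1 || x == 0 || x == 1)) = false := by
      rw [Bool.eq_false_iff]
      intro h
      rw [List.any_eq_true] at h
      obtain ⟨i, hi, hb⟩ := h
      rcases hV i hi with h | h | h <;> simp [h] at hb
    rw [hguard]
    simp only [Bool.false_eq_true, if_false]
    have hL : ∀ j ∈ PySem.List.pyRange 0 (adj.length : Int) 1, 0 ≤ j ∧ j.toNat < adj.length := by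
      intro j hj
      have := PySem.List.mem_pyRange_one.mp hj
      omega
    have hsums := sumsB_get nodes adj hrow _ hL hV
      (List.replicate (adj.length : Int).toNat 0) (by simp)
    set sums := (PySem.List.pyRange 0 (adj.length : Int) 1).foldl
      (fun sums j =>
        if PySem.List.pyGetD nodes j 0 = 1 then
          List.zipWith (· + ·) sums (PySem.List.pyGetD adj j [])
        else if PySem.List.pyGetD nodes j 0 = -1 then
          List.zipWith (· - ·) sums (PySem.List.pyGetD adj j [])
        else sums)
      (List.replicate (adj.length : Int).toNat 0) with hsumsdef
    have hval : ∀ k : Nat, k < adj.length →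
        sums.getD k 0 = pvCol nodes adj (k : Int) := by
      intro k hk
      rw [hsums.2 k hk]
      simp [pvCol]
    -- the final all over zip nodes sums
    rw [List.all_eq_true]
    have hzlen : (nodes.zip sums).length = adj.length := by
      simp [List.length_zip, hsums.1]; omega
    constructor
    · intro h i hi
      have hi' := PySem.List.mem_pyRange_one.mp hi
      have hk : i = ((i.toNat : Nat) : Int) := by omega
      have hkn : i.toNat < adj.length := by omega
      have hmem : (nodes[i.toNat]'(by omega), sums[i.toNat]'(by omega)) ∈ nodes.zip sums := by
        have : (nodes.zip sums)[i.toNat]'(by omega) = (nodes[i.toNat]'(by omega), sums[i.toNat]'(by omega)) := by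
          simp [List.getElem_zip]
        rw [← this]; exact List.getElem_mem _
      have hb := h _ hmem
      have hnv : PySem.List.pyGetD nodes i 0 = nodes[i.toNat]'(by omega) := by
        conv_lhs => rw [hk]
        rw [PySem.List.pyGetD_natCast, List.getD_eq_getElem _ _ (by omega)]
      have hsv : sums[i.toNat]'(by omega) = pvCol nodes adj i := by
        have := hval i.toNat hkn
        rw [List.getD_eq_getElem _ _ (by omega)] at this
        rw [this, ← hk]
      rw [hsv] at hb
      rw [hnv]
      simp only [Bool.or_eq_true, Bool.and_eq_true, beq_iff_eq, decide_eq_true_eq] at hb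
      unfold pvSgn
      rcases hb with (⟨h1, h2⟩ | ⟨h1, h2⟩) | ⟨h1, h2⟩ <;> rw [h1] <;> split_ifs <;> omega
    · intro h p hp
      obtain ⟨k, hklt, hkp⟩ := List.getElem_of_mem hp
      have hkn : k < adj.length := by omega
      have hkI : ((k : Nat) : Int) < (adj.length : Int) := by omega
      have hiR : ((k : Nat) : Int) ∈ PySem.List.pyRange 0 (adj.length : Int) 1 :=
        PySem.List.mem_pyRange_one.mpr ⟨by omega, hkI⟩
      have hsg := h _ hiR
      have hnv : PySem.List.pyGetD nodes ((k : Nat) : Int) 0 = nodes[k]'(by omega) := by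
        rw [PySem.List.pyGetD_natCast, List.getD_eq_getElem _ _ (by omega)]
      have hsv : sums[k]'(by omega) = pvCol nodes adj ((k : Nat) : Int) := by
        have := hval k hkn
        rw [List.getD_eq_getElem _ _ (by omega)] at this
        exact this
      have hpe : p = (nodes[k]'(by omega), sums[k]'(by omega)) := by
        rw [← hkp]; simp [List.getElem_zip]
      rw [hpe]
      rw [hnv] at hsg
      rw [hsv, ← hsg]
      unfold pvSgn
      split_ifs <;> simp <;> omega

-- ===== VERDICT (by name: the statement is the Claim_ definition above) =====
theorem steady_check_spec : Claim_equal_steady_check := by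
  intro nodes adj _ hpre
  unfold Spec_steady_check
  have hA := steady_check_iff nodes adj hpre
  have hB := steady_check_alt_iff nodes adj hpre
  rcases hb : steady_check_alt nodes adj with _ | _
  · rcases ha : steady_check nodes adj with _ | _
    · rfl
    · exact absurd (hB.mpr (hA.mp ha)) (by simp [hb])
  · exact hA.mpr (hB.mp hb)
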